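-- pv_equiv track=rewrite | github.com/egorka23/docs | scripts/regenerate_all_success_stories.py | group_cases_by_visa
-- ===== SOURCE A (Python) =====
-- from collections import defaultdict
--
-- def group_cases_by_visa(cases):
--     groups = defaultdict(list)
--     visa_order = ["EB-1A", "EB-2 NIW", "O-1"]
--
--     for case in cases:
--         visa = case.get("visa", "Other")
--         groups[visa].append(case)
--
--     result = []
--     for visa in visa_order:
--         if visa in groups:
--             result.append((visa, groups.pop(visa)))
--     for visa, cases_list in groups.items():
--         result.append((visa, cases_list))
--
--     return result
-- ===== SOURCE B (Python) =====
-- def group_cases_by_visa(cases):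
--     visa_order = ["EB-1A", "EB-2 NIW", "O-1"]
--     groups = {}
--     for case in cases:
--         visa = case.get("visa", "Other")
--         groups[visa] = groups.get(visa, []) + [case]
--     return sorted(
--         groups.items(),
--         key=lambda kv: visa_order.index(kv[0]) if kv[0] in visa_order else len(visa_order),
--     )
-- ===== Notes on version B (the rewrite author's own statement) =====
-- stated objective: simpler
-- what changed: The priority-ordering phase (loop over visa_order with membership test and dict.pop, then a second loop over the leftovers) is replaced by one stable keyed sort of the grouped dict's items, whose key ranks priority visas by position in visa_order and gives all other groups the same maximal rank so stability keeps their first-appearance order.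
import Mathlib
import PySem

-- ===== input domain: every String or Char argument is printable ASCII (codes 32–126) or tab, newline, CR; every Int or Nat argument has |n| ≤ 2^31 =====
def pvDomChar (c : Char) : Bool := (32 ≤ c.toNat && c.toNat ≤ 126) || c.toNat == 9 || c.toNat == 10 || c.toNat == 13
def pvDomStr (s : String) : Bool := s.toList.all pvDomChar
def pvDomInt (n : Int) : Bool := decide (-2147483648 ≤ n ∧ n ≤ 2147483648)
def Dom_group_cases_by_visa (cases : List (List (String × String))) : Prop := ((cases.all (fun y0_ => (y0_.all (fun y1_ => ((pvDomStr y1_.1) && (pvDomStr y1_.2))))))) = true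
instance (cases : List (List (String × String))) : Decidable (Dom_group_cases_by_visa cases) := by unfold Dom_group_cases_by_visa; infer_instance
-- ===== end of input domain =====

-- B replaces A's priority loop + dict.pop reordering by one stable keyed sort of the grouped items (objective: simpler).

-- ===== PORT A =====
-- groups.pop(visa) under the 'visa in groups' guard is lookup + removal: ported as (getD, erase),
-- exactly PySem.Dict.pop? on a contained key.
def group_cases_by_visa (cases : List (List (String × String))) : List (String × (List (List (String × String)))) :=
  let groups := cases.foldl
    (fun d c =>
      let visa := (PySem.Dict.mk c).getD "visa" "Other"
      d.modify visa [] (fun xs => xs ++ [c]))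
    PySem.Dict.empty
  let st := ["EB-1A", "EB-2 NIW", "O-1"].foldl
    (fun (st : List (String × List (List (String × String))) × PySem.Dict String (List (List (String × String)))) v =>
      if st.2.contains v then (st.1 ++ [(v, st.2.getD v [])], st.2.erase v) else st)
    ([], groups)
  st.1 ++ st.2.items

-- ===== PORT B =====
-- visa_order.index(kv[0]) if kv[0] in visa_order else len(visa_order):
-- index? is none exactly when kv[0] is not in visa_order, and len(visa_order) = 3.
def pvRankB (v : String) : Nat :=
  match PySem.List.index? ["EB-1A", "EB-2 NIW", "O-1"] v with
  | some i => i
  | none => 3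

def group_cases_by_visa_alt (cases : List (List (String × String))) : List (String × (List (List (String × String)))) :=
  let groups := cases.foldl
    (fun d c =>
      let visa := (PySem.Dict.mk c).getD "visa" "Other"
      d.insert visa (d.getD visa [] ++ [c]))
    PySem.Dict.empty
  PySem.List.sorted groups.items (fun kv => pvRankB kv.1)

-- ===== PRECONDITION & SPEC =====
def Spec_group_cases_by_visa (cases : List (List (String × String))) (out : List (String × (List (List (String × String))))) : Prop := out = group_cases_by_visa_alt cases
instance (cases : List (List (String × String))) (out : List (String × (List (List (String × String))))) : Decidable (Spec_group_cases_by_visa cases out) := by unfold Spec_group_cases_by_visa; infer_instance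

-- ===== CLAIM (what is proved, stated in full; the proofs are below) =====
def Claim_equal_group_cases_by_visa : Prop := ∀ (cases : List (List (String × String))), Dom_group_cases_by_visa cases → Spec_group_cases_by_visa cases (group_cases_by_visa cases)

-- ===== LEMMAS AND PROOFS =====

-- insertBy walks past a prefix it is not inserted before
theorem pv_insertBy_append {α : Type} (before : α → α → Bool) (x : α) (ys zs : List α)
    (h : ∀ y ∈ ys, before x y = false) :
    PySem.List.insertBy before x (ys ++ zs) = ys ++ PySem.List.insertBy before x zs := by
  induction ys with
  | nil => rfl
  | cons a t ih =>
    have ha : before x a = false := h a (by simp)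
    simp only [List.cons_append, PySem.List.insertBy, ha, Bool.false_eq_true, if_false]
    rw [ih (fun y hy => h y (by simp [hy]))]

-- insertBy goes to the front when it is before everything
theorem pv_insertBy_all_before {α : Type} (before : α → α → Bool) (x : α) (zs : List α)
    (h : ∀ y ∈ zs, before x y = true) :
    PySem.List.insertBy before x zs = x :: zs := by
  cases zs with
  | nil => rfl
  | cons a t => simp [PySem.List.insertBy, h a (by simp)]

theorem pv_key_of_mem_filter {α : Type} (key : α → Nat) (j : Nat) (l : List α) (y : α)
    (hy : y ∈ l.filter (fun x => key x == j)) : key y = j := by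
  have := (List.mem_filter.mp hy).2
  simpa using this

-- a stable sort by a Nat key bounded by 3 is the concatenation of the four key buckets
theorem pv_sorted_buckets {α : Type} (key : α → Nat) (l : List α) (hb : ∀ x ∈ l, key x ≤ 3) :
    PySem.List.sorted l key =
      l.filter (fun x => key x == 0) ++ l.filter (fun x => key x == 1) ++
      l.filter (fun x => key x == 2) ++ l.filter (fun x => key x == 3) := by
  rw [PySem.List.sorted_eq_foldl_insertBy]
  induction l using List.reverseRecOn with
  | nil => rfl
  | append_singleton l x ih =>
    rw [List.foldl_append, List.foldl_cons, List.foldl_nil,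
        ih (fun y hy => hb y (by simp [hy]))]
    have hx : key x ≤ 3 := hb x (by simp)
    simp only [List.filter_append]
    set F0 := l.filter (fun x => key x == 0) with hF0
    set F1 := l.filter (fun x => key x == 1) with hF1
    set F2 := l.filter (fun x => key x == 2) with hF2
    set F3 := l.filter (fun x => key x == 3) with hF3
    have m0 : ∀ y ∈ F0, key y = 0 := fun y hy => pv_key_of_mem_filter key 0 l y hy
    have m1 : ∀ y ∈ F1, key y = 1 := fun y hy => pv_key_of_mem_filter key 1 l y hy
    have m2 : ∀ y ∈ F2, key y = 2 := fun y hy => pv_key_of_mem_filter key 2 l y hy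
    have m3 : ∀ y ∈ F3, key y = 3 := fun y hy => pv_key_of_mem_filter key 3 l y hy
    interval_cases hk : key x
    · -- key x = 0
      have hall : ∀ y ∈ F1 ++ F2 ++ F3, (fun a b => decide (key a < key b)) x y = true := by
        intro y hy
        simp only [List.mem_append] at hy
        rcases hy with (hy | hy) | hy
        · simp [m1 y hy, hk]
        · simp [m2 y hy, hk]
        · simp [m3 y hy, hk]
      have h0 : ∀ y ∈ F0, (fun a b => decide (key a < key b)) x y = false := by
        intro y hy; simp [m0 y hy, hk]
      rw [show F0 ++ F1 ++ F2 ++ F3 = F0 ++ (F1 ++ F2 ++ F3) by simp [List.append_assoc],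
          pv_insertBy_append _ _ _ _ h0, pv_insertBy_all_before _ _ _ hall]
      simp [hk, List.append_assoc]
    · -- key x = 1
      have hpre : ∀ y ∈ F0 ++ F1, (fun a b => decide (key a < key b)) x y = false := by
        intro y hy
        simp only [List.mem_append] at hy
        rcases hy with hy | hy
        · simp [m0 y hy, hk]
        · simp [m1 y hy, hk]
      have hall : ∀ y ∈ F2 ++ F3, (fun a b => decide (key a < key b)) x y = true := by
        intro y hy
        simp only [List.mem_append] at hy
        rcases hy with hy | hy
        · simp [m2 y hy, hk]
        · simp [m3 y hy, hk]
      rw [show F0 ++ F1 ++ F2 ++ F3 = (F0 ++ F1) ++ (F2 ++ F3) by simp [List.append_assoc],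
          pv_insertBy_append _ _ _ _ hpre, pv_insertBy_all_before _ _ _ hall]
      simp [hk, List.append_assoc]
    · -- key x = 2
      have hpre : ∀ y ∈ F0 ++ F1 ++ F2, (fun a b => decide (key a < key b)) x y = false := by
        intro y hy
        simp only [List.mem_append] at hy
        rcases hy with (hy | hy) | hy
        · simp [m0 y hy, hk]
        · simp [m1 y hy, hk]
        · simp [m2 y hy, hk]
      have hall : ∀ y ∈ F3, (fun a b => decide (key a < key b)) x y = true := by
        intro y hy; simp [m3 y hy, hk]
      rw [show F0 ++ F1 ++ F2 ++ F3 = (F0 ++ F1 ++ F2) ++ F3 by simp [List.append_assoc],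
          pv_insertBy_append _ _ _ _ hpre, pv_insertBy_all_before _ _ _ hall]
      simp [hk, List.append_assoc]
    · -- key x = 3
      have hpre : ∀ y ∈ F0 ++ F1 ++ F2 ++ F3, (fun a b => decide (key a < key b)) x y = false := by
        intro y hy
        simp only [List.mem_append] at hy
        rcases hy with ((hy | hy) | hy) | hy
        · simp [m0 y hy, hk]
        · simp [m1 y hy, hk]
        · simp [m2 y hy, hk]
        · simp [m3 y hy, hk]
      rw [PySem.List.insertBy_of_forall_not_before _ _ _ hpre]
      simp [hk, List.append_assoc]

-- in a list with pairwise-distinct first components, the entries with a present key k form exactly [(k, v)]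
theorem pv_filter_fst_single {κ ν : Type} [BEq κ] [LawfulBEq κ] (l : List (κ × ν)) (k : κ) (v : ν)
    (hnd : (l.map Prod.fst).Nodup) (hm : (k, v) ∈ l) :
    l.filter (fun p => p.1 == k) = [(k, v)] := by
  induction l with
  | nil => cases hm
  | cons a t ih =>
    simp only [List.map_cons, List.nodup_cons] at hnd
    rcases List.mem_cons.mp hm with h | h
    · subst h
      simp only [List.filter_cons, BEq.rfl, if_true]
      have : t.filter (fun p => p.1 == k) = [] := by
        apply List.filter_eq_nil_iff.mpr
        intro p hp hbeq
        exact hnd.1 (by simpa [eq_of_beq hbeq] using List.mem_map_of_mem (f := Prod.fst) hp)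
      simp [this]
    · have hne : (a.1 == k) = false := by
        apply beq_eq_false_iff_ne.mpr
        intro he
        exact hnd.1 (by simpa [he] using List.mem_map_of_mem (f := Prod.fst) h)
      simp only [List.filter_cons, hne, Bool.false_eq_true, if_false]
      exact ih hnd.2 h

-- one iteration of A's priority loop, on a dict with distinct keys
theorem pv_stepA {ν : Type} (dflt : ν) (d : PySem.Dict String ν) (hnd : d.keys.Nodup)
    (res : List (String × ν)) (v : String) :
    (if d.contains v then (res ++ [(v, d.getD v dflt)], d.erase v) else (res, d))
      = (res ++ d.items.filter (fun p => p.1 == v), d.erase v) := by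
  by_cases h : d.contains v
  · rw [if_pos h]
    have hs : (d.get? v).isSome := by rw [← PySem.Dict.contains_eq_isSome_get?]; exact h
    rcases Option.isSome_iff_exists.mp hs with ⟨w, hw⟩
    have hmem : (v, w) ∈ d.items := PySem.Dict.mem_items_of_get?_eq_some d hw
    have hnd' : (d.items.map Prod.fst).Nodup := by
      simpa [PySem.Dict.keys] using hnd
    rw [pv_filter_fst_single d.items v w hnd' hmem]
    rw [PySem.Dict.getD_of_mem_items d hmem hnd dflt]
  · rw [if_neg h]
    have hnone : ∀ p ∈ d.items, (p.1 == v) = false := by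
      intro p hp
      by_contra hb
      exact h (List.any_eq_true.mpr ⟨p, hp, by simpa using hb⟩)
    have hfil : d.items.filter (fun p => p.1 == v) = [] :=
      List.filter_eq_nil_iff.mpr (fun p hp => by simp [hnone p hp])
    have herase : d.erase v = d := by
      apply PySem.Dict.ext
      show (d.items.filter fun p => !(p.1 == v)) = d.items
      exact List.filter_eq_self.mpr (fun p hp => by simp [hnone p hp])
    rw [hfil, herase]
    simp

-- erasing preserves distinctness of keys
theorem pv_nodup_erase {ν : Type} (d : PySem.Dict String ν) (v : String) (hnd : d.keys.Nodup) :
    (d.erase v).keys.Nodup := by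
  simp only [PySem.Dict.keys] at *
  exact hnd.sublist (List.Sublist.map _ (List.filter_sublist))

-- the selected (priority) entries and the remaining entries of A's loop, at the items level
def pvSel {ν : Type} : List String → List (String × ν) → List (String × ν)
  | [], _ => []
  | v :: vs, l => l.filter (fun p => p.1 == v) ++ pvSel vs (l.filter (fun p => !(p.1 == v)))

def pvRemL {ν : Type} : List String → List (String × ν) → List (String × ν)
  | [], l => l
  | v :: vs, l => pvRemL vs (l.filter (fun p => !(p.1 == v)))

-- A's priority loop, characterised on the items list
theorem pv_phaseA {ν : Type} (dflt : ν) (vs : List String) (d : PySem.Dict String ν)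
    (res : List (String × ν)) (hnd : d.keys.Nodup) :
    vs.foldl
      (fun st v => if st.2.contains v then (st.1 ++ [(v, st.2.getD v dflt)], st.2.erase v) else st)
      (res, d)
      = (res ++ pvSel vs d.items, PySem.Dict.mk (pvRemL vs d.items)) := by
  induction vs generalizing d res with
  | nil => cases d; simp [pvSel, pvRemL]
  | cons v vs ih =>
    rw [List.foldl_cons]
    show vs.foldl _ (if d.contains v then (res ++ [(v, d.getD v dflt)], d.erase v) else (res, d)) = _
    rw [pv_stepA dflt d hnd res v]
    rw [ih (d.erase v) (res ++ d.items.filter (fun p => p.1 == v)) (pv_nodup_erase d v hnd)]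
    have hitems : (d.erase v).items = d.items.filter (fun p => !(p.1 == v)) := rfl
    rw [hitems]
    simp [pvSel, pvRemL, List.append_assoc]

-- pvRankB as a plain conditional on the three literal visas
theorem pvRankB_eq (v : String) :
    pvRankB v = if v = "EB-1A" then 0 else if v = "EB-2 NIW" then 1 else if v = "O-1" then 2 else 3 := by
  unfold pvRankB
  split_ifs with h0 h1 h2
  · subst h0; rfl
  · subst h1; decide
  · subst h2; decide
  · have hnm : PySem.List.index? ["EB-1A", "EB-2 NIW", "O-1"] v = none := by
      simp [h0, h1, h2]
    rw [hnm]

theorem pvRankB_le (v : String) : pvRankB v ≤ 3 := by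
  rw [pvRankB_eq]; split_ifs <;> omega

theorem pvRank0 (v : String) : (pvRankB v == 0) = (v == "EB-1A") := by
  rw [pvRankB_eq]; split_ifs with h0 h1 h2 <;> simp [*]

-- ===== VERDICT (by name: the statement is the Claim_ definition above) =====
theorem group_cases_by_visa_spec : Claim_equal_group_cases_by_visa := by
  intro cases _hdom
  unfold Spec_group_cases_by_visa
  show group_cases_by_visa cases = group_cases_by_visa_alt cases
  simp only [group_cases_by_visa, group_cases_by_visa_alt]
  -- the two grouping passes build the same dict (modify k [] f = insert k (f (getD k [])))
  have hg :
      (cases.foldl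
        (fun d c =>
          let visa := (PySem.Dict.mk c).getD "visa" "Other"
          d.insert visa (d.getD visa [] ++ [c]))
        PySem.Dict.empty)
      = (cases.foldl
        (fun d c =>
          let visa := (PySem.Dict.mk c).getD "visa" "Other"
          d.modify visa [] (fun xs => xs ++ [c]))
        PySem.Dict.empty) := rfl
  rw [hg]
  set g := cases.foldl
      (fun d c =>
        let visa := (PySem.Dict.mk c).getD "visa" "Other"
        d.modify visa [] (fun xs => xs ++ [c]))
      PySem.Dict.empty with hgdef
  have hnd : g.keys.Nodup := by
    rw [hgdef]
    exact PySem.Dict.nodup_keys_foldl_modify_key cases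
      (fun c => (PySem.Dict.mk c).getD "visa" "Other") [] (fun _ c xs => xs ++ [c])
      PySem.Dict.empty (by simp [PySem.Dict.keys_empty])
  rw [pv_phaseA [] ["EB-1A", "EB-2 NIW", "O-1"] g [] hnd]
  rw [pv_sorted_buckets (fun kv => pvRankB kv.1) g.items (fun x _ => pvRankB_le x.1)]
  simp only [pvSel, pvRemL, List.append_nil, List.nil_append, List.filter_filter]
  rw [List.filter_congr (l := g.items)
        (p := fun p => pvRankB p.1 == 0) (q := fun p => p.1 == "EB-1A")
        (fun p _ => pvRank0 p.1)]
  have e1 : ∀ v : String, (pvRankB v == 1) = (v == "EB-2 NIW" && !(v == "EB-1A")) := by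
    intro v; rw [pvRankB_eq]; split_ifs with h0 h1 h2 <;> simp [*]
  have e2 : ∀ v : String, (pvRankB v == 2) = (v == "O-1" && (!(v == "EB-2 NIW") && !(v == "EB-1A"))) := by
    intro v; rw [pvRankB_eq]; split_ifs with h0 h1 h2 <;> simp [*]
  have e3 : ∀ v : String, (pvRankB v == 3) = (!(v == "O-1") && (!(v == "EB-2 NIW") && !(v == "EB-1A"))) := by
    intro v; rw [pvRankB_eq]; split_ifs with h0 h1 h2 <;> simp [*]
  rw [show List.filter (fun x => pvRankB x.1 == 1) g.items
        = List.filter (fun a => a.1 == "EB-2 NIW" && !(a.1 == "EB-1A")) g.items from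
      List.filter_congr (fun a _ => e1 a.1)]
  rw [show List.filter (fun x => pvRankB x.1 == 2) g.items
        = List.filter (fun a => a.1 == "O-1" && (!(a.1 == "EB-2 NIW") && !(a.1 == "EB-1A"))) g.items from
      List.filter_congr (fun a _ => e2 a.1)]
  rw [show List.filter (fun x => pvRankB x.1 == 3) g.items
        = List.filter (fun a => !(a.1 == "O-1") && (!(a.1 == "EB-2 NIW") && !(a.1 == "EB-1A"))) g.items from
      List.filter_congr (fun a _ => e3 a.1)]
  simp [List.append_assoc]
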